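-- pv_equiv track=rewrite | github.com/MancaStrah/Analiza-putk | urejanje.py | uredi_breed_size
-- ===== SOURCE A (Python) =====
-- def uredi_breed_size(breed_size):
--     size = []
--     if any(beseda in breed_size for beseda in ['heavy', 'large']):
--         size.append('large')
--     elif any(beseda in breed_size for beseda in ['bantam', 'small']):
--         size.append('small')
--     elif any(beseda in breed_size for beseda in ['medium', 'any']):
--         size.append('medium')
--     return vrni_pravilno(size)
--
-- def vrni_pravilno(seznam):
--     if len(seznam) == 1:
--         return seznam[0]
--     if len(seznam) == 0:
--         return None
--     else:
--         return seznam
-- ===== SOURCE B (Python) =====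
-- # Gather-all-then-minimise: test every keyword against the string, collect the
-- # priority ranks of all matches, and return the name of the minimal rank.
-- _KW_RANK = {'heavy': 0, 'large': 0, 'bantam': 1, 'small': 1, 'medium': 2, 'any': 2}
-- _NAMES = ['large', 'small', 'medium']
--
-- def uredi_breed_size(breed_size):
--     ranks = [rank for kw, rank in _KW_RANK.items() if kw in breed_size]
--     return _NAMES[min(ranks)] if ranks else None
-- ===== Notes on version B (the rewrite author's own statement) =====
-- stated objective: alternative
-- what changed: Instead of an ordered if/elif chain that short-circuits at the first matching category (and a list-unwrap helper), B tests all six keywords, collects the priority ranks of every match, and returns the name of the minimal rank (None when no keyword matches).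
import Mathlib
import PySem

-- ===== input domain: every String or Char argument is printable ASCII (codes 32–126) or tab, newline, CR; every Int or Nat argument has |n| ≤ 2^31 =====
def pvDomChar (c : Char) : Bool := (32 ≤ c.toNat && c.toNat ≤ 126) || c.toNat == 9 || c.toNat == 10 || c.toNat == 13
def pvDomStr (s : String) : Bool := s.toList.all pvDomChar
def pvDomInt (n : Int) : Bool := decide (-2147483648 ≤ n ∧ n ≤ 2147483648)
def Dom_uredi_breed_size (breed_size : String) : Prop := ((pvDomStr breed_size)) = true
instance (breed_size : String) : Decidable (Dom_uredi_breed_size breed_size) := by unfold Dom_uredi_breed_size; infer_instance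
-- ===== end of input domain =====

-- B tests all keywords, collects the ranks of every match and returns the minimal
-- rank's name, instead of A's short-circuiting if/elif chain plus unwrap helper (alternative).

-- ===== PORT A =====
-- Python's vrni_pravilno returns the list itself when len > 1; at the only call
-- site the list has at most one element, so that branch is unreachable (mapped to none).
def vrni_pravilno (seznam : List String) : Option String :=
  if seznam.length == 1 then seznam[0]?
  else if seznam.length == 0 then none
  else none

def uredi_breed_size (breed_size : String) : Option String :=
  let size : List String :=
    if (["heavy", "large"] : List String).any (fun beseda => PySem.Str.isIn beseda breed_size) then
      ["large"]
    else if (["bantam", "small"] : List String).any (fun beseda => PySem.Str.isIn beseda breed_size) then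
      ["small"]
    else if (["medium", "any"] : List String).any (fun beseda => PySem.Str.isIn beseda breed_size) then
      ["medium"]
    else []
  vrni_pravilno size

-- ===== PORT B =====
def pvKwRank : List (String × Nat) :=
  [("heavy", 0), ("large", 0), ("bantam", 1), ("small", 1), ("medium", 2), ("any", 2)]

def pvNames : List String := ["large", "small", "medium"]

def uredi_breed_size_alt (breed_size : String) : Option String :=
  let ranks := (pvKwRank.filter (fun p => PySem.Str.isIn p.1 breed_size)).map Prod.snd
  match ranks.min? with
  | some r => pvNames[r]?
  | none => none

-- ===== PRECONDITION & SPEC =====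
def Spec_uredi_breed_size (breed_size : String) (out : Option String) : Prop := out = uredi_breed_size_alt breed_size
instance (breed_size : String) (out : Option String) : Decidable (Spec_uredi_breed_size breed_size out) := by unfold Spec_uredi_breed_size; infer_instance

-- ===== CLAIM (what is proved, stated in full; the proofs are below) =====
def Claim_equal_uredi_breed_size : Prop := ∀ (breed_size : String), Dom_uredi_breed_size breed_size → Spec_uredi_breed_size breed_size (uredi_breed_size breed_size)

-- ===== LEMMAS AND PROOFS =====

-- ===== VERDICT (by name: the statement is the Claim_ definition above) =====
theorem uredi_breed_size_spec : Claim_equal_uredi_breed_size := by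
  intro s _
  unfold Spec_uredi_breed_size uredi_breed_size uredi_breed_size_alt pvKwRank pvNames vrni_pravilno
  simp only [List.any_cons, List.any_nil, Bool.or_false, List.filter_cons, List.filter_nil]
  generalize PySem.Str.isIn "heavy" s = b1
  generalize PySem.Str.isIn "large" s = b2
  generalize PySem.Str.isIn "bantam" s = b3
  generalize PySem.Str.isIn "small" s = b4
  generalize PySem.Str.isIn "medium" s = b5
  generalize PySem.Str.isIn "any" s = b6
  revert b1 b2 b3 b4 b5 b6
  decide
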